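-- pv_equiv track=rewrite | github.com/DylanPerdigao/SortAlgorithms | main.py | rearrangeGlobal
-- ===== SOURCE A (Python) =====
-- def rearrangeGlobal(l):
-- 	aux = dict()
-- 	for elem in l:
-- 		if elem[0] not in aux:
-- 			aux.update({elem[0]:1})
-- 		else:
-- 			count = 1 + aux.get(elem[0])
-- 			aux.update({elem[0]:count})
-- 	return list(aux.items())
-- ===== SOURCE B (Python) =====
-- def rearrangeGlobal(l):
-- 	keys = list(dict.fromkeys(e[0] for e in l))
-- 	return [(k, sum(1 for e in l if e[0] == k)) for k in keys]
-- ===== Notes on version B (the rewrite author's own statement) =====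
-- stated objective: alternative
-- what changed: Replaces the single-pass accumulating dict with an index-then-scan shape: first collect the distinct first-elements in first-seen order, then count each by a fresh scan of the list.
import Mathlib
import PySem

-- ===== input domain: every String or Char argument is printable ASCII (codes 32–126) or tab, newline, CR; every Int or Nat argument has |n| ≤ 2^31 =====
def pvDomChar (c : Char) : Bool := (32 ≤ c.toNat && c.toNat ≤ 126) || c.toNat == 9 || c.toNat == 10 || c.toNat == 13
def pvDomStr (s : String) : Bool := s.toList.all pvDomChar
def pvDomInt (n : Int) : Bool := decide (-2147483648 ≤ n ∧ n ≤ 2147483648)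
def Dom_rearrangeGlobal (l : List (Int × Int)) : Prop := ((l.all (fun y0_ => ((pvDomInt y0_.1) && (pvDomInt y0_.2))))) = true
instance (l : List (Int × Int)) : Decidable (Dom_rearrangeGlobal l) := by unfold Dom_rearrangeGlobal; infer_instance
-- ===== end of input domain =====

-- B replaces A's single-pass counting dict with first-seen distinct keys plus a counting scan per key (alternative decomposition, not faster).


-- ===== PORT A =====
def rearrangeGlobal (l : List (Int × Int)) : List (Int × Int) :=
  (l.foldl (fun aux elem =>
      if aux.contains elem.1 = false then
        aux.insert elem.1 1
      else
        aux.insert elem.1 (1 + aux.getD elem.1 0))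
    (PySem.Dict.empty : PySem.Dict Int Int)).items

-- ===== PORT B =====
def rearrangeGlobal_alt (l : List (Int × Int)) : List (Int × Int) :=
  let keys := PySem.List.dedup (l.map (fun e => e.1))
  keys.map (fun k => (k, (l.map (fun e => if e.1 == k then (1 : Int) else 0)).sum))

-- ===== PRECONDITION & SPEC =====
def Spec_rearrangeGlobal (l : List (Int × Int)) (out : List (Int × Int)) : Prop := out = rearrangeGlobal_alt l
instance (l : List (Int × Int)) (out : List (Int × Int)) : Decidable (Spec_rearrangeGlobal l out) := by unfold Spec_rearrangeGlobal; infer_instance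

-- ===== CLAIM (what is proved, stated in full; the proofs are below) =====
def Claim_equal_rearrangeGlobal : Prop := ∀ (l : List (Int × Int)), Dom_rearrangeGlobal l → Spec_rearrangeGlobal l (rearrangeGlobal l)

-- ===== LEMMAS AND PROOFS =====

-- ===== VERDICT (by name: the statement is the Claim_ definition above) =====
lemma stepA_eq (aux : PySem.Dict Int Int) (elem : Int × Int) :
    (if aux.contains elem.1 = false then aux.insert elem.1 1
     else aux.insert elem.1 (1 + aux.getD elem.1 0))
    = aux.insert elem.1 (aux.getD elem.1 0 + 1) := by
  by_cases h : aux.contains elem.1 = false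
  · simp [h, PySem.Dict.getD_of_not_contains aux 0 h]
  · simp [h]; ring_nf

lemma count_key (l : List (Int × Int)) (k : Int) :
    ((l.map (fun e => e.1)).count k : Int)
    = (l.map (fun e => if e.1 == k then (1 : Int) else 0)).sum := by
  induction l with
  | nil => simp
  | cons e t ih =>
    simp only [List.map_cons, List.sum_cons, List.count_cons, beq_iff_eq] at ih ⊢
    push_cast
    rw [ih]
    by_cases h : e.1 = k
    · simp [h]; ring
    · simp [h]

theorem rearrangeGlobal_spec : Claim_equal_rearrangeGlobal := by
  intro l _
  unfold Spec_rearrangeGlobal rearrangeGlobal rearrangeGlobal_alt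
  have hstep : l.foldl (fun aux elem =>
      if aux.contains elem.1 = false then aux.insert elem.1 1
      else aux.insert elem.1 (1 + aux.getD elem.1 0))
      (PySem.Dict.empty : PySem.Dict Int Int)
      = (l.map (fun e => e.1)).foldl
          (fun d x => d.insert x (d.getD x 0 + 1)) PySem.Dict.empty := by
    rw [List.foldl_map]
    exact PySem.List.foldl_congr_mem l _ _ _ (fun d e _ => stepA_eq d e)
  rw [hstep, PySem.Dict.foldl_insert_getD_add_one_eq_counter,
      PySem.Dict.items_counter]
  simp only [PySem.List.dedup_eq_ofList]
  exact List.map_congr_left (fun k _ => by rw [count_key])
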